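-- pv_equiv track=rewrite | github.com/tlocke/pg8000 | pg8000/converters.py | array_string_escape
-- ===== SOURCE A (Python) =====
-- def array_string_escape(v):
--     cs = []
--     for c in v:
--         if c == '\\':
--             cs.append('\\')
--         elif c == '"':
--             cs.append('\\')
--         cs.append(c)
--     val = ''.join(cs)
--     if len(val) == 0 or val == 'NULL' or any(
--             [c in val for c in ('{', '}', ",", " ", '\\')]):
--         val = '"' + val + '"'
--     return val
-- ===== SOURCE B (Python) =====
-- def array_string_escape(v):
--     # Escaping as tokenization: split at each special character and re-join
--     # with its escape sequence (backslash first, then quote).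
--     val = '\\"'.join('\\\\'.join(v.split('\\')).split('"'))
--     if not val or val == 'NULL' or not set('{}, \\').isdisjoint(val):
--         val = '"' + val + '"'
--     return val
-- ===== Notes on version B (the rewrite author's own statement) =====
-- stated objective: faster
-- what changed: Escaping is done by tokenization instead of a character-accumulating loop: the string is split at each special character and the pieces are re-joined with its escape sequence (split on backslash joined with doubled backslash, then split on quote joined with backslash-quote), and the quoting guard tests set disjointness of the result's characters against the special set instead of per-character substring membership.
import Mathlib
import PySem

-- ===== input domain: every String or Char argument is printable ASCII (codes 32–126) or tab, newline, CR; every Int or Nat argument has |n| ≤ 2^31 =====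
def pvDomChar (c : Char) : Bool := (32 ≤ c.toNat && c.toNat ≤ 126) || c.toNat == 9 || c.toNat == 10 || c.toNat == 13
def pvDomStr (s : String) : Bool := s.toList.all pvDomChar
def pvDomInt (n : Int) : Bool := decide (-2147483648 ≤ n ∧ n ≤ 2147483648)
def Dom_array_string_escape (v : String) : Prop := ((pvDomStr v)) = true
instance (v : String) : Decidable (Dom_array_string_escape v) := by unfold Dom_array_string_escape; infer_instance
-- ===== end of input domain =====

-- B escapes by tokenization — split the string at each special character and re-join the pieces
-- with its escape sequence — and decides quoting by set disjointness (measured faster: C-level split/join vs a per-character Python loop).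

-- ===== PORT A =====
-- strings are ported on their code-point lists (exact on the stated ASCII domain)
def array_string_escape (v : String) : String :=
  let cs : List (List Char) := v.toList.foldl
    (fun cs c =>
      (if c = '\\' then cs ++ [['\\']]
       else if c = '"' then cs ++ [['\\']]
       else cs) ++ [[c]]) []
  let val := PySem.Chars.join [] cs
  let val :=
    if PySem.Chars.len val = 0 ∨ val = ['N','U','L','L'] ∨
        (['{','}',',',' ','\\'].map (fun c => PySem.Chars.isIn [c] val)).any id = true
    then ['"'] ++ val ++ ['"'] else val
  String.ofList val

-- ===== PORT B =====
def array_string_escape_alt (v : String) : String :=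
  let val := PySem.Chars.join ['\\','"']
    (PySem.Chars.splitOn (PySem.Chars.join ['\\','\\'] (PySem.Chars.splitOn v.toList ['\\'])) ['"'])
  let val :=
    if val.isEmpty = true ∨ val = ['N','U','L','L'] ∨
        (PySem.Set.ofList ['{','}',',',' ','\\']).isdisjoint (PySem.Set.ofList val) = false
    then ['"'] ++ val ++ ['"'] else val
  String.ofList val

-- ===== PRECONDITION & SPEC =====
def Spec_array_string_escape (v : String) (out : String) : Prop := out = array_string_escape_alt v
instance (v : String) (out : String) : Decidable (Spec_array_string_escape v out) := by unfold Spec_array_string_escape; infer_instance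

-- ===== CLAIM (what is proved, stated in full; the proofs are below) =====
def Claim_equal_array_string_escape : Prop := ∀ (v : String), Dom_array_string_escape v → Spec_array_string_escape v (array_string_escape v)

-- ===== LEMMAS AND PROOFS =====

-- the per-character escape map a single split/join pass performs
def pvEsc (o : Char) (new : List Char) (l : List Char) : List Char :=
  l.flatMap (fun c => if c = o then new else [c])

-- intercalate over a nonempty cons
lemma pv_ic_cons (sep x y : List Char) (t : List (List Char)) :
    List.intercalate sep (x :: y :: t) = x ++ sep ++ List.intercalate sep (y :: t) := by
  simp [List.intercalate]

-- appending to the LAST piece appends to the intercalation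
lemma pv_ic_last_append (sep : List Char) :
    ∀ (xs : List (List Char)) (p t : List Char),
      List.intercalate sep (xs ++ [p ++ t]) = List.intercalate sep (xs ++ [p]) ++ t
  | [], p, t => by simp [List.intercalate]
  | x :: xs, p, t => by
      cases xs with
      | nil => simp [List.intercalate]
      | cons y ys =>
          have ih := pv_ic_last_append sep (y :: ys) p t
          simp only [List.cons_append] at ih ⊢
          simp only [pv_ic_cons]
          rw [ih]
          simp

-- adding one more (empty) piece at the end appends one separator
lemma pv_ic_snoc_nil (sep : List Char) :
    ∀ (xs : List (List Char)) (p : List Char),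
      List.intercalate sep (xs ++ [p, []]) = List.intercalate sep (xs ++ [p]) ++ sep
  | [], p => by simp [List.intercalate]
  | x :: xs, p => by
      cases xs with
      | nil => simp [List.intercalate]
      | cons y ys =>
          have ih := pv_ic_snoc_nil sep (y :: ys) p
          simp only [List.cons_append] at ih ⊢
          simp only [pv_ic_cons]
          rw [ih]
          simp

-- split-at-a-single-char then re-join with `new` IS the per-character escape map
lemma pv_go_single (o : Char) (new : List Char) :
    ∀ (l : List Char) (fuel : Nat) (cur : List Char) (acc : List (List Char)),
      l.length ≤ fuel →
      new.intercalate (PySem.Chars.splitOn.go [o] fuel l cur acc)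
        = new.intercalate (acc.reverse ++ [cur.reverse]) ++ pvEsc o new l := by
  intro l
  induction l with
  | nil =>
      intro fuel cur acc _
      cases fuel <;> simp [PySem.Chars.splitOn.go, pvEsc]
  | cons c rest ih =>
      intro fuel cur acc h
      cases fuel with
      | zero => simp at h
      | succ fuel =>
          by_cases hc : c = o
          · subst hc
            simp only [PySem.Chars.splitOn.go, List.isPrefixOf, BEq.rfl, Bool.true_and,
              if_pos]
            simp only [List.length_cons, List.length_nil, Nat.zero_add, List.drop_one,
              List.tail_cons]
            rw [ih fuel [] (cur.reverse :: acc) (Nat.le_of_succ_le_succ (by simpa using h))]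
            simp only [List.reverse_cons, List.reverse_nil, List.append_assoc]
            rw [show acc.reverse ++ ([cur.reverse] ++ [[]]) = acc.reverse ++ [cur.reverse, []] by simp,
              pv_ic_snoc_nil]
            simp [pvEsc]
          · simp only [PySem.Chars.splitOn.go]
            rw [if_neg, ih fuel (c :: cur) acc (by simpa using Nat.le_of_succ_le_succ h)]
            · rw [show (c :: cur).reverse = cur.reverse ++ [c] by simp, pv_ic_last_append]
              simp [pvEsc, hc]
            · simp only [List.isPrefixOf, Bool.and_eq_true, beq_iff_eq]
              exact fun hp => hc hp.1.symm

lemma pv_join_split (o : Char) (new s : List Char) :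
    PySem.Chars.join new (PySem.Chars.splitOn s [o]) = pvEsc o new s := by
  rw [PySem.Chars.join, PySem.Chars.splitOn,
    pv_go_single o new s (s.length + 1) [] [] (Nat.le_succ _)]
  simp [List.intercalate]

-- ''.join on a list of pieces is flatten
lemma pv_join_nil_flatten : ∀ xs : List (List Char), PySem.Chars.join [] xs = xs.flatten
  | [] => PySem.Chars.join_nil []
  | [p] => by simp [PySem.Chars.join_singleton]
  | p :: q :: r => by
      rw [PySem.Chars.join_cons_cons]
      simp [pv_join_nil_flatten (q :: r)]

-- A's loop is a flatMap of per-character pieces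
lemma pv_A_fold (v : List Char) :
    v.foldl (fun cs c =>
        (if c = '\\' then cs ++ [['\\']]
         else if c = '"' then cs ++ [['\\']]
         else cs) ++ [[c]]) ([] : List (List Char))
      = v.flatMap (fun c =>
          (if c = '\\' then [['\\']] else if c = '"' then [['\\']] else []) ++ [[c]]) := by
  have h : (fun (cs : List (List Char)) (c : Char) =>
        (if c = '\\' then cs ++ [['\\']]
         else if c = '"' then cs ++ [['\\']]
         else cs) ++ [[c]])
      = fun cs c => cs ++ ((if c = '\\' then [['\\']] else if c = '"' then [['\\']] else []) ++ [[c]]) := by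
    funext cs c
    split_ifs <;> simp
  rw [h, PySem.List.foldl_append_eq_flatMap]
  simp

-- A's escaped text equals B's two split/join passes
lemma pv_esc_eq (v : List Char) :
    (v.flatMap (fun c =>
        (if c = '\\' then [['\\']] else if c = '"' then [['\\']] else []) ++ [[c]])).flatten
      = pvEsc '"' ['\\','"'] (pvEsc '\\' ['\\','\\'] v) := by
  induction v with
  | nil => simp [pvEsc]
  | cons c t ih =>
      simp only [List.flatMap_cons, List.flatten_append, pvEsc, List.flatMap_append] at *
      rw [ih]
      congr 1
      by_cases h1 : c = '\\' <;> by_cases h2 : c = '"' <;> simp [h1, h2]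

lemma pv_isIn_single (c : Char) (s : List Char) : PySem.Chars.isIn [c] s = s.contains c := by
  rw [Bool.eq_iff_iff]
  simp [PySem.Chars.isIn_iff_infix, List.singleton_infix_iff]

-- the two quoting guards agree
lemma pv_guard_iff (val : List Char) :
    (PySem.Chars.len val = 0 ∨ val = ['N','U','L','L'] ∨
        (['{','}',',',' ','\\'].map (fun c => PySem.Chars.isIn [c] val)).any id = true)
  ↔ (val.isEmpty = true ∨ val = ['N','U','L','L'] ∨
        (PySem.Set.ofList ['{','}',',',' ','\\']).isdisjoint (PySem.Set.ofList val) = false) := by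
  have hmain : ((['{','}',',',' ','\\'].map (fun c => PySem.Chars.isIn [c] val)).any id = true)
      ↔ ((PySem.Set.ofList ['{','}',',',' ','\\']).isdisjoint (PySem.Set.ofList val) = false) := by
    rw [Bool.eq_false_iff, Ne, PySem.Set.isdisjoint_iff]
    push Not
    simp only [pv_isIn_single, List.any_map, List.any_eq_true, id_eq, Function.comp_apply,
      List.contains_iff_mem, PySem.Set.mem_ofList]
  apply or_congr _ (or_congr Iff.rfl hmain)
  simp [PySem.Chars.len_eq, List.isEmpty_iff]

-- ===== VERDICT (by name: the statement is the Claim_ definition above) =====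
theorem array_string_escape_spec : Claim_equal_array_string_escape := by
  intro v _
  unfold Spec_array_string_escape
  simp only [array_string_escape, array_string_escape_alt,
    pv_join_split, pv_A_fold, pv_join_nil_flatten, pv_esc_eq]
  rw [if_congr (pv_guard_iff _) rfl rfl]
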